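-- pv_equiv track=rewrite | github.com/nansen-ai/twitter-sentiment-monitor | src/aggregator.py | _get_theme_urgency
-- ===== SOURCE A (Python) =====
-- from typing import List, Dict, Tuple, Optional
--
-- def _get_theme_urgency(tweets: List[Dict]) -> str:
--     """
--     Determine overall urgency level for a theme.
--
--     Args:
--         tweets: List of tweets with this theme
--
--     Returns:
--         Urgency level: HIGH, MEDIUM, or LOW
--     """
--     urgency_counts = {"HIGH": 0, "MEDIUM": 0, "LOW": 0}
--
--     for tweet in tweets:
--         urgency = tweet["analysis"].get("urgency", "LOW")
--         if urgency in urgency_counts: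
--             urgency_counts[urgency] += 1
--
--     # Return highest urgency level found
--     if urgency_counts["HIGH"] > 0:
--         return "HIGH"
--     elif urgency_counts["MEDIUM"] > 0:
--         return "MEDIUM"
--     return "LOW"
-- ===== SOURCE B (Python) =====
-- def _get_theme_urgency(tweets):
--     """Determine overall urgency level for a theme (reduce-to-maximum over ranks)."""
--     order = {"LOW": 0, "MEDIUM": 1, "HIGH": 2}
--     labels = ["LOW", "MEDIUM", "HIGH"]
--     best = 0
--     for tweet in tweets:
--         best = max(best, order.get(tweet["analysis"].get("urgency", "LOW"), 0))
--     return labels[best]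
-- ===== Notes on version B (the rewrite author's own statement) =====
-- stated objective: simpler
-- what changed: Replaces the per-level counting dictionary and the HIGH/MEDIUM/LOW threshold cascade with a single running maximum over numeric urgency ranks, returning the label of the maximum rank.
import Mathlib
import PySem

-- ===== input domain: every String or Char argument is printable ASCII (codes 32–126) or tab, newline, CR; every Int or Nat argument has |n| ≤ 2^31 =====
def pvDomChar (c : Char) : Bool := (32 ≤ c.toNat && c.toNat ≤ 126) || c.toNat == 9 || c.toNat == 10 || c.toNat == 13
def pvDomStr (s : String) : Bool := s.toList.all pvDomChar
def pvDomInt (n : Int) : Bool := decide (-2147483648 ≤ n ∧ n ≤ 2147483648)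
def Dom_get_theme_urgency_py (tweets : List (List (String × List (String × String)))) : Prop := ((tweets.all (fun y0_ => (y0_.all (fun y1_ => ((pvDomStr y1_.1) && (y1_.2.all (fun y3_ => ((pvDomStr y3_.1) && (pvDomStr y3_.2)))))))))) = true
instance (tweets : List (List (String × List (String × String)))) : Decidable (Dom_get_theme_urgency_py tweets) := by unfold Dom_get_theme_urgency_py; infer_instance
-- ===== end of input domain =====

-- B replaces A's per-level counting dictionary and threshold cascade by a running maximum
-- over numeric urgency ranks (objective: simpler); equal on every input where A returns
-- (Pre_ excludes tweets without an "analysis" key, on which both Pythons raise KeyError).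


-- ===== PORT A =====
-- the counting loop: urgency_counts updated per tweet; none = KeyError on tweet["analysis"]
def aCount : List (List (String × List (String × String))) → PySem.Dict String Int →
    Option (PySem.Dict String Int)
  | [], d => some d
  | t :: ts, d =>
    match (PySem.Dict.mk t).get? "analysis" with
    | none => none
    | some a =>
      let u := (PySem.Dict.mk a).getD "urgency" "LOW"
      aCount ts (if d.contains u then d.modify u 0 (· + 1) else d)

def get_theme_urgency_py (tweets : List (List (String × List (String × String)))) : String :=
  match aCount tweets (PySem.Dict.ofList [("HIGH", (0 : Int)), ("MEDIUM", 0), ("LOW", 0)]) with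
  | none => ""   -- KeyError: unreachable under Pre_
  | some d =>
    if d.getD "HIGH" 0 > 0 then "HIGH"
    else if d.getD "MEDIUM" 0 > 0 then "MEDIUM"
    else "LOW"

-- ===== PORT B =====
def bOrder : PySem.Dict String Int := PySem.Dict.ofList [("LOW", 0), ("MEDIUM", 1), ("HIGH", 2)]

-- running maximum of ranks; none = KeyError on tweet["analysis"]
def bLoop : List (List (String × List (String × String))) → Int → Option Int
  | [], best => some best
  | t :: ts, best =>
    match (PySem.Dict.mk t).get? "analysis" with
    | none => none
    | some a =>
      bLoop ts (max best (bOrder.getD ((PySem.Dict.mk a).getD "urgency" "LOW") 0))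

def get_theme_urgency_py_alt (tweets : List (List (String × List (String × String)))) : String :=
  match bLoop tweets 0 with
  | none => ""   -- KeyError: unreachable under Pre_
  | some best => (PySem.List.pyGet? ["LOW", "MEDIUM", "HIGH"] best).getD ""

-- ===== PRECONDITION & SPEC =====
-- Pre_ excludes tweets lacking an "analysis" key: there A (and B) raise KeyError.
def Pre_get_theme_urgency_py (tweets : List (List (String × List (String × String)))) : Prop :=
  ∀ t ∈ tweets, (PySem.Dict.mk t).contains "analysis" = true
instance (tweets : List (List (String × List (String × String)))) : Decidable (Pre_get_theme_urgency_py tweets) := by unfold Pre_get_theme_urgency_py; infer_instance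

def pvWitness_get_theme_urgency_py : (List (List (String × List (String × String)))) :=
  [[("analysis", [("urgency", "HIGH")])], [("analysis", [])]]

def Spec_get_theme_urgency_py (tweets : List (List (String × List (String × String)))) (out : String) : Prop := out = get_theme_urgency_py_alt tweets
instance (tweets : List (List (String × List (String × String)))) (out : String) : Decidable (Spec_get_theme_urgency_py tweets out) := by unfold Spec_get_theme_urgency_py; infer_instance

-- ===== CLAIM (what is proved, stated in full; the proofs are below) =====
def Claim_equal_get_theme_urgency_py : Prop := ∀ (tweets : List (List (String × List (String × String)))), Dom_get_theme_urgency_py tweets → Pre_get_theme_urgency_py tweets → Spec_get_theme_urgency_py tweets (get_theme_urgency_py tweets)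

-- ===== LEMMAS AND PROOFS =====

-- the final decision A takes on its counts dict
def aDecide (d : PySem.Dict String Int) : String :=
  if d.getD "HIGH" 0 > 0 then "HIGH"
  else if d.getD "MEDIUM" 0 > 0 then "MEDIUM"
  else "LOW"

lemma rank_eval (u : String) :
    bOrder.getD u 0 = if u = "HIGH" then 2 else if u = "MEDIUM" then 1 else 0 := by
  by_cases h1 : u = "HIGH" <;> by_cases h2 : u = "MEDIUM" <;> by_cases h3 : u = "LOW" <;>
    simp_all [bOrder, PySem.Dict.ofList, PySem.Dict.getD, PySem.Dict.update,
      PySem.Dict.get?_insert, PySem.Dict.get?_empty]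

lemma keys_modify_of_contains (d : PySem.Dict String Int) (k : String) (h : d.contains k = true) :
    (d.modify k 0 (· + 1)).keys = d.keys := by
  unfold PySem.Dict.modify; rw [PySem.Dict.keys_insert_of_contains _ _ h]

lemma main_inv :
    ∀ (ts : List (List (String × List (String × String)))) (d : PySem.Dict String Int) (best : Int),
    (∀ t ∈ ts, (PySem.Dict.mk t).contains "analysis" = true) →
    d.keys = ["HIGH", "MEDIUM", "LOW"] →
    0 ≤ d.getD "HIGH" 0 → 0 ≤ d.getD "MEDIUM" 0 →
    ((0 : Int) < d.getD "HIGH" 0 ↔ best = 2) →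
    (1 ≤ best ↔ (0 < d.getD "HIGH" 0 ∨ 0 < d.getD "MEDIUM" 0)) →
    0 ≤ best → best ≤ 2 →
    (match aCount ts d with
     | none => ""
     | some d' => aDecide d') =
    (match bLoop ts best with
     | none => ""
     | some b => (PySem.List.pyGet? ["LOW", "MEDIUM", "HIGH"] b).getD "") := by
  intro ts
  induction ts with
  | nil =>
    intro d best hpre hkeys hHn hMn h1 h2 hb0 hb2
    simp only [aCount, bLoop]
    have hb : best = 0 ∨ best = 1 ∨ best = 2 := by omega
    rcases hb with h | h | h <;> subst h
    · have hH' : ¬ 0 < d.getD "HIGH" 0 := fun hx => absurd (h1.mp hx) (by decide)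
      have hM' : ¬ 0 < d.getD "MEDIUM" 0 := fun hx => by
        have := h2.mpr (Or.inr hx); omega
      simp [aDecide, hH', hM', PySem.List.pyGet?, PySem.List.pyIdx?]
    · have hH' : ¬ 0 < d.getD "HIGH" 0 := fun hx => absurd (h1.mp hx) (by decide)
      have hM' : 0 < d.getD "MEDIUM" 0 := (h2.mp (by omega)).resolve_left hH'
      simp [aDecide, hH', hM', PySem.List.pyGet?, PySem.List.pyIdx?]
    · have hH' : 0 < d.getD "HIGH" 0 := h1.mpr rfl
      simp [aDecide, hH', PySem.List.pyGet?, PySem.List.pyIdx?]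
  | cons t ts ih =>
    intro d best hpre hkeys hHn hMn h1 h2 hb0 hb2
    have hc := hpre t (by simp)
    obtain ⟨a, ha⟩ : ∃ a, (PySem.Dict.mk t).get? "analysis" = some a := by
      rw [PySem.Dict.contains_eq_isSome_get?] at hc
      exact Option.isSome_iff_exists.mp hc
    have hpre' : ∀ t' ∈ ts, (PySem.Dict.mk t').contains "analysis" = true := by
      intro t' ht'; exact hpre t' (by simp [ht'])
    simp only [aCount, bLoop, ha]
    have hcont : d.contains ((PySem.Dict.mk a).getD "urgency" "LOW")
        = decide (((PySem.Dict.mk a).getD "urgency" "LOW") ∈ (["HIGH", "MEDIUM", "LOW"] : List String)) := by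
      rw [PySem.Dict.contains_eq_decide_mem_keys, hkeys]
    set u := (PySem.Dict.mk a).getD "urgency" "LOW" with hu
    by_cases hH : u = "HIGH"
    · rw [hH] at hcont ⊢
      rw [hcont, rank_eval]
      have hmax : max best (if ("HIGH":String) = "HIGH" then 2 else if ("HIGH":String) = "MEDIUM" then 1 else (0:Int)) = 2 := by
        simp; omega
      rw [hmax]
      simp only [decide_eq_true_eq, if_pos (by simp : ("HIGH":String) ∈ (["HIGH","MEDIUM","LOW"]:List String))]
      apply ih _ _ hpre'
      · exact (keys_modify_of_contains d "HIGH" (by rw [hcont]; simp)).trans hkeys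
      · rw [PySem.Dict.getD_modify]; simp; omega
      · rw [PySem.Dict.getD_modify]; simp; omega
      · rw [PySem.Dict.getD_modify]; simp; omega
      · rw [PySem.Dict.getD_modify, PySem.Dict.getD_modify]; simp; omega
      · omega
      · omega
    · by_cases hM : u = "MEDIUM"
      · rw [hM] at hcont ⊢
        rw [hcont, rank_eval]
        have hmax : max best (if ("MEDIUM":String) = "HIGH" then 2 else if ("MEDIUM":String) = "MEDIUM" then 1 else (0:Int)) = max best 1 := by
          simp
        rw [hmax]
        simp only [decide_eq_true_eq, if_pos (by simp : ("MEDIUM":String) ∈ (["HIGH","MEDIUM","LOW"]:List String))]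
        apply ih _ _ hpre'
        · exact (keys_modify_of_contains d "MEDIUM" (by rw [hcont]; simp)).trans hkeys
        · rw [PySem.Dict.getD_modify]; simp; omega
        · rw [PySem.Dict.getD_modify]; simp; omega
        · rw [PySem.Dict.getD_modify]; simp; omega
        · rw [PySem.Dict.getD_modify, PySem.Dict.getD_modify]; simp; omega
        · omega
        · omega
      · by_cases hL : u = "LOW"
        · rw [hL] at hcont ⊢
          rw [hcont, rank_eval]
          have hmax : max best (if ("LOW":String) = "HIGH" then 2 else if ("LOW":String) = "MEDIUM" then 1 else (0:Int)) = best := by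
            simp; omega
          rw [hmax]
          simp only [decide_eq_true_eq, if_pos (by simp : ("LOW":String) ∈ (["HIGH","MEDIUM","LOW"]:List String))]
          apply ih _ _ hpre'
          · exact (keys_modify_of_contains d "LOW" (by rw [hcont]; simp)).trans hkeys
          · rw [PySem.Dict.getD_modify]; simp; omega
          · rw [PySem.Dict.getD_modify]; simp; omega
          · rw [PySem.Dict.getD_modify]; simp; omega
          · rw [PySem.Dict.getD_modify, PySem.Dict.getD_modify]; simp; omega
          · omega
          · omega
        · rw [hcont, rank_eval]
          have hcf : decide (u ∈ (["HIGH","MEDIUM","LOW"]:List String)) = false := by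
            simp [hH, hM, hL]
          rw [hcf]
          have hmax : max best (if u = "HIGH" then 2 else if u = "MEDIUM" then 1 else (0:Int)) = best := by
            simp [hH, hM]
            omega
          rw [hmax]
          simp only [Bool.false_eq_true]
          exact ih d best hpre' hkeys hHn hMn h1 h2 hb0 hb2

-- ===== VERDICT (by name: the statement is the Claim_ definition above) =====
theorem get_theme_urgency_py_spec : Claim_equal_get_theme_urgency_py := by
  intro tweets _ hpre
  unfold Spec_get_theme_urgency_py get_theme_urgency_py get_theme_urgency_py_alt
  have h := main_inv tweets (PySem.Dict.ofList [("HIGH", (0 : Int)), ("MEDIUM", 0), ("LOW", 0)]) 0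
    hpre (by decide) (by decide) (by decide) (by decide) (by decide) (by decide) (by decide)
  simpa [aDecide] using h
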